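-- pv_equiv track=rewrite | github.com/blazxex/2110101_CompProg | 07_StrFile_Password_Strength.py | letter_sequence
-- ===== SOURCE A (Python) =====
-- def letter_sequence(t):
--     for i in range(len(t)-3):
--         if 'a'<= t[i].lower() <='z':
--             a = t[i].lower()
--             b = t[i+1].lower()
--             c = t[i+2].lower()
--             d = t[i+3].lower()
--             if ord(a)==ord(b)-1==ord(c)-2==ord(d)-3:
--                 return True
--             elif ord(a)==ord(b)+1==ord(c)+2==ord(d)+3:
--                 return True
--     return False
-- ===== SOURCE B (Python) =====
-- def letter_sequence(t):
--     asc = 1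
--     desc = 1
--     for i in range(1, len(t)):
--         diff = ord(t[i].lower()) - ord(t[i - 1].lower())
--         asc = asc + 1 if diff == 1 else 1
--         desc = desc + 1 if diff == -1 else 1
--         if (asc >= 4 or desc >= 4) and 'a' <= t[i - 3].lower() <= 'z':
--             return True
--     return False
-- ===== Notes on version B (the rewrite author's own statement) =====
-- stated objective: faster
-- what changed: Replaces A's per-start four-character window test (four lower() calls and two chained ord comparisons per window) by a single left-to-right pass maintaining ascending/descending run-length counters with one adjacent-pair comparison per index.
import Mathlib
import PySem

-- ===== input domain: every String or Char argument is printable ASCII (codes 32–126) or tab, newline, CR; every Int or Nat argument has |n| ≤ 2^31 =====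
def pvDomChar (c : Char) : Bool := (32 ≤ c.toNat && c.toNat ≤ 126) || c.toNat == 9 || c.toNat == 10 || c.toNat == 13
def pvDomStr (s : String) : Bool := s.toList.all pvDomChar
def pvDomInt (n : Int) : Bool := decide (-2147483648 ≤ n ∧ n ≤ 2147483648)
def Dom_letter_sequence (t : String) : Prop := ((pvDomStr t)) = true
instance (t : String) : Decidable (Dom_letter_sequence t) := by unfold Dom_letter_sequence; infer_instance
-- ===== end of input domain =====

-- B replaces A's four-lowercase-calls-per-window test by a single pass with ascending/descending run counters (one comparison per index); return value only, no side effects.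

-- ===== PORT A =====
-- every index accessed is provably < l.length (i + 3 < l.length from the loop bound), so getD is exact
def lsAgo (l : List Char) : Nat → Nat → Bool
  | 0, _ => false
  | fuel+1, i =>
    let a := PySem.Chars.lowerChar (l.getD i ' ')
    if 'a' ≤ a ∧ a ≤ 'z' then
      let b := PySem.Chars.lowerChar (l.getD (i+1) ' ')
      let c := PySem.Chars.lowerChar (l.getD (i+2) ' ')
      let d := PySem.Chars.lowerChar (l.getD (i+3) ' ')
      if (a.toNat : Int) = (b.toNat : Int) - 1 ∧ (b.toNat : Int) - 1 = (c.toNat : Int) - 2 ∧ (c.toNat : Int) - 2 = (d.toNat : Int) - 3 then true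
      else if (a.toNat : Int) = (b.toNat : Int) + 1 ∧ (b.toNat : Int) + 1 = (c.toNat : Int) + 2 ∧ (c.toNat : Int) + 2 = (d.toNat : Int) + 3 then true
      else lsAgo l fuel (i+1)
    else lsAgo l fuel (i+1)

def letter_sequence (t : String) : Bool :=
  lsAgo t.toList (t.toList.length - 3) 0

-- ===== PORT B =====
-- i - 3 is only relevant when a run counter reached 4, which forces i ≥ 3 (Python short-circuits the access then); otherwise the guard is false whatever the clamped getD yields
def lsBgo (l : List Char) : Int → Int → Nat → Nat → Bool
  | _, _, 0, _ => false
  | asc, desc, fuel+1, i =>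
    let diff : Int := ((PySem.Chars.lowerChar (l.getD i ' ')).toNat : Int) - ((PySem.Chars.lowerChar (l.getD (i-1) ' ')).toNat : Int)
    let asc' := if diff = 1 then asc + 1 else 1
    let desc' := if diff = -1 then desc + 1 else 1
    let s := PySem.Chars.lowerChar (l.getD (i-3) ' ')
    if (asc' ≥ 4 ∨ desc' ≥ 4) ∧ ('a' ≤ s ∧ s ≤ 'z') then true
    else lsBgo l asc' desc' fuel (i+1)

def letter_sequence_alt (t : String) : Bool :=
  lsBgo t.toList 1 1 (t.toList.length - 1) 1

-- ===== PRECONDITION & SPEC =====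
def Spec_letter_sequence (t : String) (out : Bool) : Prop := out = letter_sequence_alt t
instance (t : String) (out : Bool) : Decidable (Spec_letter_sequence t out) := by unfold Spec_letter_sequence; infer_instance

-- ===== CLAIM (what is proved, stated in full; the proofs are below) =====
def Claim_equal_letter_sequence : Prop := ∀ (t : String), Dom_letter_sequence t → Spec_letter_sequence t (letter_sequence t)

-- ===== LEMMAS AND PROOFS =====

-- ord of the lowered character at index i
def pvOrdLow (l : List Char) (i : Nat) : Int := ((PySem.Chars.lowerChar (l.getD i ' ')).toNat : Int)

-- difference between lowered positions i and i+1
def dstep (l : List Char) (i : Nat) : Int := pvOrdLow l (i+1) - pvOrdLow l i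

def gate (l : List Char) (i : Nat) : Prop :=
  'a' ≤ PySem.Chars.lowerChar (l.getD i ' ') ∧ PySem.Chars.lowerChar (l.getD i ' ') ≤ 'z'

def winAsc (l : List Char) (k : Nat) : Prop := dstep l k = 1 ∧ dstep l (k+1) = 1 ∧ dstep l (k+2) = 1
def winDesc (l : List Char) (k : Nat) : Prop := dstep l k = -1 ∧ dstep l (k+1) = -1 ∧ dstep l (k+2) = -1

def condA (l : List Char) (k : Nat) : Prop := gate l k ∧ (winAsc l k ∨ winDesc l k)

def ascRun : List Char → Nat → Int
  | _, 0 => 1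
  | l, i+1 => if dstep l i = 1 then ascRun l i + 1 else 1

def descRun : List Char → Nat → Int
  | _, 0 => 1
  | l, i+1 => if dstep l i = -1 then descRun l i + 1 else 1

def condB (l : List Char) (j : Nat) : Prop :=
  (ascRun l j ≥ 4 ∨ descRun l j ≥ 4) ∧ gate l (j - 3)

lemma exists_lt_succ_shift (P : Nat → Prop) (fuel i : Nat) :
    (∃ k, k < fuel + 1 ∧ P (i + k)) ↔ P i ∨ (∃ k, k < fuel ∧ P ((i + 1) + k)) := by
  constructor
  · rintro ⟨k, hk, hp⟩
    cases k with
    | zero => exact Or.inl hp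
    | succ k => exact Or.inr ⟨k, by omega, (show i + (k + 1) = i + 1 + k by omega) ▸ hp⟩
  · rintro (hp | ⟨k, hk, hp⟩)
    · exact ⟨0, by omega, hp⟩
    · exact ⟨k + 1, by omega, (show i + 1 + k = i + (k + 1) by omega) ▸ hp⟩

lemma lemA (l : List Char) : ∀ fuel i, lsAgo l fuel i = true ↔ ∃ k, k < fuel ∧ condA l (i + k) := by
  intro fuel
  induction fuel with
  | zero => intro i; simp [lsAgo]
  | succ fuel ih =>
    intro i
    rw [exists_lt_succ_shift]
    show lsAgo l (fuel+1) i = true ↔ _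
    simp only [lsAgo]
    by_cases hg : 'a' ≤ PySem.Chars.lowerChar (l.getD i ' ') ∧ PySem.Chars.lowerChar (l.getD i ' ') ≤ 'z'
    · simp only [if_pos hg]
      by_cases h1 : ((PySem.Chars.lowerChar (l.getD i ' ')).toNat : Int) = ((PySem.Chars.lowerChar (l.getD (i+1) ' ')).toNat : Int) - 1 ∧ ((PySem.Chars.lowerChar (l.getD (i+1) ' ')).toNat : Int) - 1 = ((PySem.Chars.lowerChar (l.getD (i+2) ' ')).toNat : Int) - 2 ∧ ((PySem.Chars.lowerChar (l.getD (i+2) ' ')).toNat : Int) - 2 = ((PySem.Chars.lowerChar (l.getD (i+3) ' ')).toNat : Int) - 3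
      · simp only [if_pos h1, true_iff]
        refine Or.inl ⟨hg, Or.inl ?_⟩
        simp only [winAsc, dstep, pvOrdLow, show i+1+1 = i+2 from rfl, show i+2+1 = i+3 from rfl]
        omega
      · simp only [if_neg h1]
        by_cases h2 : ((PySem.Chars.lowerChar (l.getD i ' ')).toNat : Int) = ((PySem.Chars.lowerChar (l.getD (i+1) ' ')).toNat : Int) + 1 ∧ ((PySem.Chars.lowerChar (l.getD (i+1) ' ')).toNat : Int) + 1 = ((PySem.Chars.lowerChar (l.getD (i+2) ' ')).toNat : Int) + 2 ∧ ((PySem.Chars.lowerChar (l.getD (i+2) ' ')).toNat : Int) + 2 = ((PySem.Chars.lowerChar (l.getD (i+3) ' ')).toNat : Int) + 3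
        · simp only [if_pos h2, true_iff]
          refine Or.inl ⟨hg, Or.inr ?_⟩
          simp only [winDesc, dstep, pvOrdLow, show i+1+1 = i+2 from rfl, show i+2+1 = i+3 from rfl]
          omega
        · simp only [if_neg h2]
          rw [ih (i+1)]
          constructor
          · exact Or.inr
          · rintro (⟨_, (hw | hw)⟩ | h)
            · exact absurd (by simp only [winAsc, dstep, pvOrdLow, show i+1+1 = i+2 from rfl, show i+2+1 = i+3 from rfl] at hw; omega) h1
            · exact absurd (by simp only [winDesc, dstep, pvOrdLow, show i+1+1 = i+2 from rfl, show i+2+1 = i+3 from rfl] at hw; omega) h2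
            · exact h
    · simp only [if_neg hg]
      rw [ih (i+1)]
      constructor
      · exact Or.inr
      · rintro (⟨hg', _⟩ | h)
        · exact absurd hg' hg
        · exact h

lemma lemB (l : List Char) : ∀ fuel i,
    lsBgo l (ascRun l i) (descRun l i) fuel (i + 1) = true ↔ ∃ k, k < fuel ∧ condB l ((i + 1) + k) := by
  intro fuel
  induction fuel with
  | zero => intro i; simp [lsBgo]
  | succ fuel ih =>
    intro i
    rw [exists_lt_succ_shift]
    show lsBgo l (ascRun l i) (descRun l i) (fuel+1) (i+1) = true ↔ _
    simp only [lsBgo]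
    have hdiff : ((PySem.Chars.lowerChar (l.getD (i+1) ' ')).toNat : Int) - ((PySem.Chars.lowerChar (l.getD (i+1-1) ' ')).toNat : Int) = dstep l i := by
      simp only [show i+1-1 = i from rfl, dstep, pvOrdLow]
    rw [hdiff]
    have hasc : (if dstep l i = 1 then ascRun l i + 1 else 1) = ascRun l (i+1) := by
      simp [ascRun]
    have hdesc : (if dstep l i = -1 then descRun l i + 1 else 1) = descRun l (i+1) := by
      simp [descRun]
    rw [hasc, hdesc]
    by_cases hc : (ascRun l (i+1) ≥ 4 ∨ descRun l (i+1) ≥ 4) ∧ ('a' ≤ PySem.Chars.lowerChar (l.getD (i+1-3) ' ') ∧ PySem.Chars.lowerChar (l.getD (i+1-3) ' ') ≤ 'z')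
    · simp only [if_pos hc, true_iff]
      exact Or.inl ⟨hc.1, hc.2⟩
    · simp only [if_neg hc]
      rw [ih (i+1)]
      constructor
      · exact Or.inr
      · rintro (h | h)
        · exact absurd h hc
        · exact h

lemma ascRun_ge_one (l : List Char) : ∀ i, 1 ≤ ascRun l i := by
  intro i
  induction i with
  | zero => simp [ascRun]
  | succ i ih => simp only [ascRun]; split <;> omega

lemma descRun_ge_one (l : List Char) : ∀ i, 1 ≤ descRun l i := by
  intro i
  induction i with
  | zero => simp [descRun]
  | succ i ih => simp only [descRun]; split <;> omega

lemma ascRun_le (l : List Char) : ∀ i, ascRun l i ≤ i + 1 := by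
  intro i
  induction i with
  | zero => simp [ascRun]
  | succ i ih => simp only [ascRun]; split <;> omega

lemma descRun_le (l : List Char) : ∀ i, descRun l i ≤ i + 1 := by
  intro i
  induction i with
  | zero => simp [descRun]
  | succ i ih => simp only [descRun]; split <;> omega

lemma ascRun_ge4 (l : List Char) (m : Nat) : ascRun l (m+3) ≥ 4 ↔ winAsc l m := by
  have h1 := ascRun_ge_one l m
  have h2 := ascRun_le l m
  simp only [ascRun, winAsc]
  split_ifs with ha hb hc <;> constructor <;> intro h <;> omega

lemma descRun_ge4 (l : List Char) (m : Nat) : descRun l (m+3) ≥ 4 ↔ winDesc l m := by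
  have h1 := descRun_ge_one l m
  have h2 := descRun_le l m
  simp only [descRun, winDesc]
  split_ifs with ha hb hc <;> constructor <;> intro h <;> omega

lemma bridge (l : List Char) :
    (∃ k, k < l.length - 3 ∧ condA l (0 + k)) ↔ (∃ k, k < l.length - 1 ∧ condB l (1 + k)) := by
  constructor
  · rintro ⟨k, hk, hg, hw⟩
    rw [Nat.zero_add] at hg hw
    refine ⟨k + 2, by omega, ?_, ?_⟩
    · have h13 : 1 + (k + 2) = k + 3 := by omega
      rw [h13]
      rcases hw with hw | hw
      · exact Or.inl ((ascRun_ge4 l k).mpr hw)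
      · exact Or.inr ((descRun_ge4 l k).mpr hw)
    · have h13 : 1 + (k + 2) - 3 = k := by omega
      rw [h13]; exact hg
  · rintro ⟨k, hk, hr, hg⟩
    have hge3 : 1 + k ≥ 3 := by
      by_contra hlt
      have ha := ascRun_le l (1 + k)
      have hd := descRun_le l (1 + k)
      omega
    obtain ⟨m, hme⟩ : ∃ m, 1 + k = m + 3 := ⟨1 + k - 3, by omega⟩
    rw [hme] at hr hg
    refine ⟨m, by omega, ?_, ?_⟩
    · rw [Nat.zero_add]
      have h3 : m + 3 - 3 = m := by omega
      rw [h3] at hg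
      exact hg
    · rw [Nat.zero_add]
      rcases hr with hr | hr
      · exact Or.inl ((ascRun_ge4 l m).mp hr)
      · exact Or.inr ((descRun_ge4 l m).mp hr)

lemma main_eq (t : String) : letter_sequence t = letter_sequence_alt t := by
  have hA := lemA t.toList (t.toList.length - 3) 0
  have hB := lemB t.toList (t.toList.length - 1) 0
  simp only [ascRun, descRun, Nat.zero_add] at hB
  have := (bridge t.toList)
  unfold letter_sequence letter_sequence_alt
  rw [Bool.eq_iff_iff, hA, hB]
  exact this

-- ===== VERDICT (by name: the statement is the Claim_ definition above) =====
theorem letter_sequence_spec : Claim_equal_letter_sequence := by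
  intro t _
  unfold Spec_letter_sequence
  exact main_eq t
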